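-- pv_equiv track=rewrite | github.com/eryeer/CS61A-The-Structure-and-Interpretation-of-Computer-Programs | homework/hw04/problems/hw04.py | get_pingpong
-- ===== SOURCE A (Python) =====
-- def get_pingpong(n):
--     seq = [1]
--     i = 1
--     flag = 1
--     if n == 1:
--         return seq[0]
--     while i < n:
--         if flag == 1:
--             seq = seq + [seq[i - 1] + 1]
--         else:
--             seq = seq + [seq[i - 1] - 1]
--         if (i + 1) % 7 == 0 or contain_seven(i + 1):
--             flag = switch_dir(flag)
--         i += 1
--     return seq[n - 1]
--
-- def switch_dir(x):
--     """return 0 or 1"""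
--     return 1 - x
--
-- def contain_seven(n):
--     while n != 0:
--         left, remainder = n // 10, n % 10
--         if remainder == 7:
--             return True
--         n = left
--     return False
-- ===== SOURCE B (Python) =====
-- def has_seven(k):
--     if k % 10 == 7:
--         return True
--     if k >= 10:
--         return has_seven(k // 10)
--     return False
--
-- def get_pingpong(n):
--     v = d = 1
--     for i in range(1, n):
--         if i % 7 == 0 or has_seven(i):
--             d = -d
--         v += d
--     return v
-- ===== Notes on version B (the rewrite author's own statement) =====
-- stated objective: faster
-- what changed: B keeps a single running value and a +1/-1 direction instead of rebuilding the whole sequence list by concatenation at every step, turning the quadratic list construction into a constant-state loop.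
-- outside the precondition, e.g. on get_pingpong(-1): A raises IndexError, B returns 1
import Mathlib
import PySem

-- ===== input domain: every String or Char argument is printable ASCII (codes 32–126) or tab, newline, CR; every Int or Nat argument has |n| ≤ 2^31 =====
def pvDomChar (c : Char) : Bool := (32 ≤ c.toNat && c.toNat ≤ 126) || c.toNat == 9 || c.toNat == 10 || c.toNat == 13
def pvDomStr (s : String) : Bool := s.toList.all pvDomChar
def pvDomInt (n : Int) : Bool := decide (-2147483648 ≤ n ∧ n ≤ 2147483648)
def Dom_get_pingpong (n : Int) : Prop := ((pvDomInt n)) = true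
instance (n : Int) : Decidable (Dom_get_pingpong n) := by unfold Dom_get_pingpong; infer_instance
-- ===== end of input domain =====

-- B replaces A's quadratic list-rebuilding loop by a single running value with a ±1 direction (faster: asymptotic).

-- ===== PORT A =====
-- contain_seven: Python while loop, ported with fuel (n.natAbs is always enough for the n ≥ 2 call sites)
def pvContain7 (n : Int) (fuel : Nat) : Bool :=
  match fuel with
  | 0 => false
  | fuel + 1 =>
    if n ≠ 0 then
      if PySem.Int.mod n 10 == 7 then true
      else pvContain7 (PySem.Int.floordiv n 10) fuel
    else false

def pvLoopA (n : Int) : List Int → Int → Int → Nat → List Int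
  | seq, _, _, 0 => seq
  | seq, i, flag, fuel + 1 =>
    if i < n then
      let seq' := if flag == 1
        then seq ++ [PySem.List.pyGetD seq (i - 1) 0 + 1]
        else seq ++ [PySem.List.pyGetD seq (i - 1) 0 - 1]
      let flag' := if PySem.Int.mod (i + 1) 7 == 0 || pvContain7 (i + 1) (i + 1).natAbs
        then 1 - flag else flag
      pvLoopA n seq' (i + 1) flag' fuel
    else seq

def get_pingpong (n : Int) : Int :=
  let seq : List Int := [1]
  if n == 1 then PySem.List.pyGetD seq 0 0
  else
    let seq' := pvLoopA n seq 1 1 (n - 1).toNat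
    PySem.List.pyGetD seq' (n - 1) 0

-- ===== PORT B =====
def pvHas7 (k : Int) : Bool :=
  if PySem.Int.mod k 10 == 7 then true
  else if 10 ≤ k then pvHas7 (PySem.Int.floordiv k 10)
  else false
termination_by k.toNat
decreasing_by
  rw [PySem.Int.floordiv_eq_ediv_of_pos (by omega : (0:Int) < 10)]
  omega

def pvStep (st : Int × Int) (i : Int) : Int × Int :=
  let d := if PySem.Int.mod i 7 == 0 || pvHas7 i then -st.2 else st.2
  (st.1 + d, d)

def get_pingpong_alt (n : Int) : Int :=
  (List.foldl pvStep (1, 1) (PySem.List.pyRange 1 n 1)).1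

-- ===== PRECONDITION & SPEC =====
-- Pre_ excludes n ≤ -1, where Python A raises IndexError (seq[n-1] on the one-element list).
def Pre_get_pingpong (n : Int) : Prop := 0 ≤ n
instance (n : Int) : Decidable (Pre_get_pingpong n) := by unfold Pre_get_pingpong; infer_instance
def pvWitness_get_pingpong : Int := 10

def Spec_get_pingpong (n : Int) (out : Int) : Prop := out = get_pingpong_alt n
instance (n : Int) (out : Int) : Decidable (Spec_get_pingpong n out) := by unfold Spec_get_pingpong; infer_instance

-- ===== CLAIM (what is proved, stated in full; the proofs are below) =====
def Claim_equal_get_pingpong : Prop := ∀ (n : Int), Dom_get_pingpong n → Pre_get_pingpong n → Spec_get_pingpong n (get_pingpong n)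

-- ===== LEMMAS AND PROOFS =====

def pvDir (flag : Int) : Int := if flag = 1 then 1 else -1

lemma pvContain7_eq_has7 : ∀ (fuel : Nat) (m : Int), 0 ≤ m → m.toNat ≤ fuel →
    pvContain7 m fuel = pvHas7 m := by
  intro fuel
  induction fuel with
  | zero =>
    intro m hm hf
    have : m = 0 := by omega
    subst this
    rw [pvHas7]
    decide
  | succ fuel ih =>
    intro m hm hf
    simp only [pvContain7]
    by_cases h0 : m = 0
    · subst h0; rw [if_neg (by simp), pvHas7]; decide
    · rw [if_pos h0]
      rw [pvHas7]
      have h10 : (0:Int) < 10 := by omega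
      have hfd : PySem.Int.floordiv m 10 = m / 10 :=
        PySem.Int.floordiv_eq_ediv_of_pos h10
      by_cases h7 : PySem.Int.mod m 10 == 7
      · rw [if_pos h7, if_pos h7]
      · rw [if_neg h7, if_neg h7]
        have hrec := ih (PySem.Int.floordiv m 10) (by rw [hfd]; omega) (by rw [hfd]; omega)
        rw [hrec]
        by_cases hge : (10:Int) ≤ m
        · rw [if_pos hge]
        · rw [if_neg hge]
          have : PySem.Int.floordiv m 10 = 0 := by rw [hfd]; omega
          rw [this, pvHas7]; decide

lemma pvLoopA_spec : ∀ (fuel : Nat) (n i flag v d : Int) (seq : List Int),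
    1 ≤ i → i ≤ n → fuel = (n - i).toNat →
    (i : Int) = seq.length →
    PySem.List.pyGetD seq (i - 1) 0 = v →
    (if PySem.Int.mod i 7 == 0 || pvHas7 i then -d else d) = pvDir flag →
    (flag = 0 ∨ flag = 1) →
    PySem.List.pyGetD (pvLoopA n seq i flag fuel) (n - 1) 0
      = (List.foldl pvStep (v, d) (PySem.List.pyRange i n 1)).1 := by
  intro fuel
  induction fuel with
  | zero =>
    intro n i flag v d seq h1 h2 hf hlen hv hd hflag
    have hni : n = i := by omega
    subst hni
    simp only [pvLoopA]
    rw [PySem.List.pyRange_one]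
    simp only [sub_self, Int.toNat_zero, List.range_zero, List.map_nil, List.foldl_nil]
    exact hv
  | succ fuel ih =>
    intro n i flag v d seq h1 h2 hf hlen hv hd hflag
    have hin : i < n := by omega
    simp only [pvLoopA]
    rw [if_pos hin]
    -- contain_seven(i+1) agrees with has_seven(i+1)
    have hc7 : pvContain7 (i + 1) (i + 1).natAbs = pvHas7 (i + 1) :=
      pvContain7_eq_has7 (i + 1).natAbs (i + 1) (by omega) (by omega)
    rw [hc7]
    -- peel one element from B's range
    rw [PySem.List.pyRange_one_cons hin, List.foldl_cons]
    have hstep : pvStep (v, d) i = (v + pvDir flag, pvDir flag) := by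
      simp only [pvStep]
      rw [hd]
    rw [hstep]
    -- the appended element is v + pvDir flag in both flag cases
    have happ : (if flag == 1
        then seq ++ [PySem.List.pyGetD seq (i - 1) 0 + 1]
        else seq ++ [PySem.List.pyGetD seq (i - 1) 0 - 1])
        = seq ++ [v + pvDir flag] := by
      rcases hflag with rfl | rfl
      · rw [hv]; norm_num [pvDir, sub_eq_add_neg]
      · rw [hv]; norm_num [pvDir]
    rw [happ]
    -- apply the induction hypothesis at i + 1
    refine ih n (i + 1)
      (if (PySem.Int.mod (i + 1) 7 == 0 || pvHas7 (i + 1)) = true then 1 - flag else flag)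
      (v + pvDir flag) (pvDir flag) (seq ++ [v + pvDir flag])
      (by omega) (by omega) (by omega) ?_ ?_ ?_ ?_
    · simp only [List.length_append, List.length_cons, List.length_nil]
      push_cast
      omega
    · have hred : i + 1 - 1 = (seq.length : Int) := by omega
      rw [hred, PySem.List.pyGetD_natCast]
      simp [List.getD]
    · by_cases hc : (PySem.Int.mod (i + 1) 7 == 0 || pvHas7 (i + 1)) = true
      · rw [if_pos hc, if_pos hc]
        rcases hflag with rfl | rfl <;> norm_num [pvDir]
      · rw [if_neg hc, if_neg hc]
    · rcases hflag with rfl | rfl <;> split <;> norm_num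

-- ===== VERDICT (by name: the statement is the Claim_ definition above) =====
theorem get_pingpong_spec : Claim_equal_get_pingpong := by
  intro n _ hpre
  unfold Spec_get_pingpong
  have hpre' : (0:Int) ≤ n := hpre
  by_cases h0 : n = 0
  · subst h0; rfl
  by_cases h1 : n = 1
  · subst h1; rfl
  have h2 : (2:Int) ≤ n := by omega
  unfold get_pingpong get_pingpong_alt
  rw [if_neg (by simp [h1])]
  exact pvLoopA_spec (n - 1).toNat n 1 1 1 1 [1] (by omega) (by omega) (by omega)
    (by simp) (by norm_num [PySem.List.pyGetD_zero]) (by rw [pvHas7]; decide) (Or.inr rfl)
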